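-- pv_equiv track=rewrite | github.com/quantumleapquokka/Harmonic-Composer | backend/chords_tools.py | fill_or_trim_progression
-- ===== SOURCE A (Python) =====
-- from typing import List, Tuple, Optional, Iterable
--
-- def fill_or_trim_progression(chords: List[str], target_len: int, fill_token: str = "N.C.") -> List[str]:
--     """
--     Repeat or trim chords to reach target_len (useful for fixed sequence lengths).
--     """
--     if target_len <= 0:
--         return []
--     if not chords:
--         return [fill_token] * target_len
--     out = []
--     i = 0
--     while len(out) < target_len:
--         out.append(chords[i % len(chords)])
--         i += 1
--     return out[:target_len]
-- ===== SOURCE B (Python) =====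
-- def fill_or_trim_progression(chords, target_len, fill_token="N.C."):
--     if target_len <= 0:
--         return []
--     if not chords:
--         return [fill_token] * target_len
--     reps = target_len // len(chords) + 1
--     return (chords * reps)[:target_len]
-- ===== Notes on version B (the rewrite author's own statement) =====
-- stated objective: simpler
-- what changed: Replaces the per-element while loop with running length check and modulo indexing by one arithmetic repeat count, bulk list replication and a single slice.
import Mathlib
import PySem

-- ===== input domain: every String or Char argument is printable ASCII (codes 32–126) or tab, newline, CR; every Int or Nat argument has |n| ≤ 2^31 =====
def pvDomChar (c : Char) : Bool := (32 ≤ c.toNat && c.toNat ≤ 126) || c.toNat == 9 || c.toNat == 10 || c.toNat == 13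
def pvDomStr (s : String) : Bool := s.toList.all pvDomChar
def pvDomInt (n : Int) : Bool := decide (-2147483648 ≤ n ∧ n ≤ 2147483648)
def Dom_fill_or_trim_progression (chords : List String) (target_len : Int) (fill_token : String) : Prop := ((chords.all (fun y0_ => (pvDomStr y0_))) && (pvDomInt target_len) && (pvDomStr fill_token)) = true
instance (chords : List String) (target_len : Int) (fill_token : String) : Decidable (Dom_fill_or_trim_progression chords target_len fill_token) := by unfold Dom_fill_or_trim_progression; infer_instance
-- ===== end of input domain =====

-- B replaces A's per-element while loop (length check + modulo index each step) by an
-- arithmetic repeat count, bulk replication and one slice; objective: simpler.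
-- A is total, so no Pre_ is needed.

-- ===== PORT A =====
-- the while loop: append chords[i % len(chords)] until len(out) = target.
-- chords ≠ [] and i ≥ 0 at every call, so getD (i % chords.length) is exact for chords[i % len(chords)].
def pvFillLoopA (chords : List String) (target : Nat) (out : List String) (i : Nat) : List String :=
  if out.length < target then
    pvFillLoopA chords target (out ++ [chords.getD (i % chords.length) ""]) (i + 1)
  else out
termination_by target - out.length
decreasing_by simp_all; omega

def fill_or_trim_progression (chords : List String) (target_len : Int) (fill_token : String) : List String :=
  if target_len ≤ 0 then []
  else if chords = [] then List.replicate target_len.toNat fill_token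
  else PySem.List.slice (pvFillLoopA chords target_len.toNat [] 0) none (some target_len)

-- ===== PORT B =====
def fill_or_trim_progression_alt (chords : List String) (target_len : Int) (fill_token : String) : List String :=
  if target_len ≤ 0 then []
  else if chords = [] then List.replicate target_len.toNat fill_token
  else
    -- reps = target_len // len(chords) + 1; (chords * reps)[:target_len]
    let reps : Int := PySem.Int.floordiv target_len (chords.length : Int) + 1
    PySem.List.slice (List.replicate reps.toNat chords).flatten none (some target_len)

-- ===== PRECONDITION & SPEC =====
def Spec_fill_or_trim_progression (chords : List String) (target_len : Int) (fill_token : String) (out : List String) : Prop := out = fill_or_trim_progression_alt chords target_len fill_token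
instance (chords : List String) (target_len : Int) (fill_token : String) (out : List String) : Decidable (Spec_fill_or_trim_progression chords target_len fill_token out) := by unfold Spec_fill_or_trim_progression; infer_instance

-- ===== CLAIM (what is proved, stated in full; the proofs are below) =====
def Claim_equal_fill_or_trim_progression : Prop := ∀ (chords : List String) (target_len : Int) (fill_token : String), Dom_fill_or_trim_progression chords target_len fill_token → Spec_fill_or_trim_progression chords target_len fill_token (fill_or_trim_progression chords target_len fill_token)

-- ===== LEMMAS AND PROOFS =====

-- the canonical form both sides are reduced to
lemma pvFillLoopA_spec (chords : List String) (d : Nat) :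
    ∀ (out : List String) (i : Nat),
    pvFillLoopA chords (out.length + d) out i
      = out ++ (List.range d).map (fun k => chords.getD ((i + k) % chords.length) "") := by
  induction d with
  | zero =>
    intro out i
    rw [pvFillLoopA]
    simp
  | succ d ih =>
    intro out i
    rw [pvFillLoopA]
    have h1 : out.length < out.length + (d + 1) := by omega
    simp only [h1, if_pos]
    have h2 : (out ++ [chords.getD (i % chords.length) ""]).length + d = out.length + (d + 1) := by
      simp; omega
    rw [← h2, ih]
    simp [List.range_succ_eq_map, List.map_map, Function.comp, List.append_assoc]
    intro k _
    have : i + 1 + k = i + (k + 1) := by ring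
    rw [this]

lemma pv_take_eq_map_range (chords : List String) (t : Nat) (ht : t ≤ chords.length) :
    chords.take t = (List.range t).map (fun k => chords.getD (k % chords.length) "") := by
  apply List.ext_getElem
  · simp; omega
  · intro j hj1 hj2
    simp at hj1
    have hjl : j < chords.length := by omega
    have hjt : j < t := by omega
    simp [List.getElem_take, Nat.mod_eq_of_lt hjl, List.getD, List.getElem?_eq_getElem hjl]

lemma pv_flatten_replicate_take (chords : List String) (r : Nat) :
    ∀ t : Nat, t ≤ r * chords.length →
    (List.replicate r chords).flatten.take t
      = (List.range t).map (fun k => chords.getD ((k % chords.length)) "") := by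
  induction r with
  | zero =>
    intro t ht
    simp at ht
    subst ht
    simp
  | succ r ih =>
    intro t ht
    rw [List.replicate_succ, List.flatten_cons, List.take_append]
    by_cases hcase : t ≤ chords.length
    · have : t - chords.length = 0 := by omega
      rw [this]
      simp [pv_take_eq_map_range chords t hcase]
    · have hlen : chords.length ≤ t := by omega
      rw [List.take_of_length_le hlen, ih (t - chords.length) (by
        rw [Nat.add_mul, Nat.one_mul] at ht
        omega)]
      have hsplit : t = chords.length + (t - chords.length) := by omega
      conv_rhs => rw [hsplit, List.range_add, List.map_append, List.map_map]
      congr 1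
      · rw [← pv_take_eq_map_range chords chords.length le_rfl, List.take_of_length_le le_rfl]
      · apply List.map_congr_left
        intro k _
        simp [Function.comp, Nat.add_mod_left]

-- ===== VERDICT (by name: the statement is the Claim_ definition above) =====
theorem fill_or_trim_progression_spec : Claim_equal_fill_or_trim_progression := by
  intro chords target_len fill_token _
  unfold Spec_fill_or_trim_progression fill_or_trim_progression fill_or_trim_progression_alt
  by_cases h0 : target_len ≤ 0
  · simp [h0]
  · simp only [h0, if_false]
    by_cases hnil : chords = []
    · simp [hnil]
    · simp only [hnil, if_false]
      have hpos : 0 < target_len := by omega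
      have hlpos : 0 < chords.length := List.length_pos_iff.mpr hnil
      set t : Nat := target_len.toNat with htdef
      have htl : (t : Int) = target_len := Int.toNat_of_nonneg (by omega)
      -- A side
      have hA := pvFillLoopA_spec chords t [] 0
      simp only [List.length_nil, Nat.zero_add, List.nil_append, Nat.zero_add] at hA
      -- reps.toNat = t / len + 1
      have hflo : PySem.Int.floordiv target_len (chords.length : Int) + 1
          = ((t / chords.length + 1 : Nat) : Int) := by
        rw [PySem.Int.floordiv_eq_ediv_of_pos (by exact_mod_cast hlpos), ← htl]
        push_cast
        ring
      rw [hflo]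
      have hB := pv_flatten_replicate_take chords (t / chords.length + 1) t (by
        have h1 := Nat.div_add_mod t chords.length
        have h2 := Nat.mod_lt t hlpos
        rw [Nat.add_mul, Nat.one_mul, Nat.mul_comm (t / chords.length) chords.length]
        omega)
      rw [PySem.List.slice_to _ (by omega), PySem.List.slice_to _ (by omega), Int.toNat_natCast,
        hB, hA, List.take_of_length_le (by simp [htdef])]
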